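-- pv_equiv track=rewrite | github.com/mikiyas-girma/alx-higher_level_programming | 0x07-python-test_driven_development/5-text_indentation.py | text_indentation
-- ===== SOURCE A (Python) =====
-- def text_indentation(text):
--
--     """ the function prints two newlines after if it catches
--         . or : or ? in the text given to the function
--     """
--     if not isinstance(text, str):
--         raise TypeError('text must be a string')
--     res = []
--     sentence = ""
--     for char in text:
--         sentence += char
--         if char in '.?:':
--             res.append(sentence.strip() + '\n\n')
--             sentence = ""
--     res.append(sentence.strip())
--
--     return ''.join(res)
-- ===== SOURCE B (Python) =====
-- import re
--
--
-- def text_indentation(text):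
--     """Print two newlines after each of '.', '?', ':' in text."""
--     if not isinstance(text, str):
--         raise TypeError('text must be a string')
--     parts = re.split(r'(?<=[.?:])', text)
--     return '\n\n'.join(p.strip() for p in parts)
-- ===== Notes on version B (the rewrite author's own statement) =====
-- stated objective: idiomatic
-- what changed: Replaces the per-character accumulation loop (building each sentence one char at a time and appending to a result list) with a regex split-after-delimiter (lookbehind keeps '.?:' attached) followed by a single strip-and-join over whole segments.
import Mathlib
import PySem

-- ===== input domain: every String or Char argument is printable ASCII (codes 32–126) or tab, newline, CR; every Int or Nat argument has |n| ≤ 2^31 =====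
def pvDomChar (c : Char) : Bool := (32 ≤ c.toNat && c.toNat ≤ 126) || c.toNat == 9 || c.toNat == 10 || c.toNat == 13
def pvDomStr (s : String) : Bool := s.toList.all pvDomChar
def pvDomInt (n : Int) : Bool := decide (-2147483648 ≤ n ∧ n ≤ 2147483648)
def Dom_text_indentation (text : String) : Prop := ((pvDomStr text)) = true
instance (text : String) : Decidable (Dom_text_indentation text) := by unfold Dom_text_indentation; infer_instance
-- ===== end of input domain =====

-- B replaces A's per-character accumulation loop by a split-after-delimiter followed by
-- one strip-and-join over whole segments (objective: idiomatic). Return value only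
-- (A only returns; the isinstance TypeError is outside the String-typed domain).

-- ===== PORT A =====
-- per-character loop: res/sentence state; on '.?:' append stripped sentence + "\n\n"
def aStep (st : List (List Char) × List Char) (c : Char) : List (List Char) × List Char :=
  let sentence := st.2 ++ [c]
  if c ∈ ['.', '?', ':'] then
    (st.1 ++ [PySem.Chars.strip sentence ++ ['\n', '\n']], [])
  else
    (st.1, sentence)

def text_indentation (text : String) : String :=
  let fin := text.toList.foldl aStep ([], [])
  String.ofList (PySem.Chars.join [] (fin.1 ++ [PySem.Chars.strip fin.2]))

-- ===== PORT B =====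
-- hand port of re.split(r'(?<=[.?:])', text): split AFTER each delimiter, delimiter kept
def splitAfterDelims : List Char → List Char → List (List Char)
  | acc, [] => [acc]
  | acc, c :: cs =>
    if c ∈ ['.', '?', ':'] then (acc ++ [c]) :: splitAfterDelims [] cs
    else splitAfterDelims (acc ++ [c]) cs

def text_indentation_alt (text : String) : String :=
  String.ofList (PySem.Chars.join ['\n', '\n']
    ((splitAfterDelims [] text.toList).map PySem.Chars.strip))

-- ===== PRECONDITION & SPEC =====
def Spec_text_indentation (text : String) (out : String) : Prop := out = text_indentation_alt text
instance (text : String) (out : String) : Decidable (Spec_text_indentation text out) := by unfold Spec_text_indentation; infer_instance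

-- ===== CLAIM (what is proved, stated in full; the proofs are below) =====
def Claim_equal_text_indentation : Prop := ∀ (text : String), Dom_text_indentation text → Spec_text_indentation text (text_indentation text)

-- ===== LEMMAS AND PROOFS =====

lemma join_empty_append (xs : List (List Char)) (x : List Char) :
    PySem.Chars.join [] (xs ++ [x]) = PySem.Chars.join [] xs ++ x := by
  induction xs with
  | nil => simp [PySem.Chars.join_nil, PySem.Chars.join_singleton]
  | cons y ys ih =>
    cases ys with
    | nil =>
      simp [PySem.Chars.join_singleton, PySem.Chars.join_cons_cons]
    | cons z t =>
      rw [List.cons_append, List.cons_append,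
        PySem.Chars.join_cons_cons, PySem.Chars.join_cons_cons,
        ← List.cons_append, ih]
      simp

lemma splitAfterDelims_ne_nil (acc cs : List Char) : splitAfterDelims acc cs ≠ [] := by
  induction cs generalizing acc with
  | nil => simp [splitAfterDelims]
  | cons c cs ih =>
    simp only [splitAfterDelims]
    split
    · simp
    · exact ih _

lemma join_strip_splitAfter_cons (p : List Char) (rest : List (List Char)) (h : rest ≠ []) :
    PySem.Chars.join ['\n', '\n'] ((p :: rest).map PySem.Chars.strip)
      = PySem.Chars.strip p ++ ['\n', '\n']
        ++ PySem.Chars.join ['\n', '\n'] (rest.map PySem.Chars.strip) := by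
  cases rest with
  | nil => exact absurd rfl h
  | cons q t => simp [PySem.Chars.join_cons_cons]

lemma loop_split (cs : List Char) (res : List (List Char)) (sent : List Char) :
    PySem.Chars.join [] ((cs.foldl aStep (res, sent)).1
        ++ [PySem.Chars.strip (cs.foldl aStep (res, sent)).2])
    = PySem.Chars.join [] res
      ++ PySem.Chars.join ['\n', '\n'] ((splitAfterDelims sent cs).map PySem.Chars.strip) := by
  induction cs generalizing res sent with
  | nil =>
    simp [splitAfterDelims, PySem.Chars.join_singleton, join_empty_append]
  | cons c cs ih =>
    by_cases hc : c ∈ ['.', '?', ':']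
    · simp only [List.foldl_cons, aStep, hc, if_true, splitAfterDelims]
      rw [ih, join_empty_append,
        join_strip_splitAfter_cons _ _ (splitAfterDelims_ne_nil [] cs)]
      simp
    · simp only [List.foldl_cons, aStep, splitAfterDelims, hc, if_false]
      exact ih res (sent ++ [c])

-- ===== VERDICT (by name: the statement is the Claim_ definition above) =====
theorem text_indentation_spec : Claim_equal_text_indentation := by
  intro text _
  simp only [Spec_text_indentation, text_indentation, text_indentation_alt]
  rw [loop_split text.toList [] [], PySem.Chars.join_nil, List.nil_append]
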